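-- pv_equiv track=rewrite | github.com/kaduceo/coalitional_explanation_methods | utils.py | check_all_attributs_groups
-- ===== SOURCE A (Python) =====
-- def sorted_groups(groups):
--     return [sorted(group) for group in groups]
--
-- def check_all_attributs_groups(groups, nb_attributs):
--     """
--     Check if all attributs are in at least one group.
--
--     Parameters
--     ----------
--     groups : two-dimension list
--         List of groups defined by a coalitional method.
--     nb_attributs : int
--         Number of attribut in the dataset.
--
--     Returns
--     -------
--     groups : two-dimension list
--         Checked list of groups, with all attributs.
--     """
--
--     for i in range(nb_attributs):
--         flag = False
--
--         for group in groups: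
--             flag = flag | (i in group)
--
--         if not flag:
--             groups.append([i])
--
--     return sorted_groups(groups)
-- ===== SOURCE B (Python) =====
-- def sorted_groups(groups):
--     return [sorted(group) for group in groups]
--
--
-- def check_all_attributs_groups(groups, nb_attributs):
--     present = set()
--     for group in groups:
--         present.update(group)
--     missing = sorted(set(range(nb_attributs)) - present)
--     for i in missing:
--         groups.append([i])
--     return sorted_groups(groups)
-- ===== Notes on version B (the rewrite author's own statement) =====
-- stated objective: faster
-- what changed: B replaces A's per-attribute rescan of all groups (for each i in range(nb_attributs), scan every group) by building the set of present attributes once and appending the missing ones from a single sorted set difference.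
import Mathlib
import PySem

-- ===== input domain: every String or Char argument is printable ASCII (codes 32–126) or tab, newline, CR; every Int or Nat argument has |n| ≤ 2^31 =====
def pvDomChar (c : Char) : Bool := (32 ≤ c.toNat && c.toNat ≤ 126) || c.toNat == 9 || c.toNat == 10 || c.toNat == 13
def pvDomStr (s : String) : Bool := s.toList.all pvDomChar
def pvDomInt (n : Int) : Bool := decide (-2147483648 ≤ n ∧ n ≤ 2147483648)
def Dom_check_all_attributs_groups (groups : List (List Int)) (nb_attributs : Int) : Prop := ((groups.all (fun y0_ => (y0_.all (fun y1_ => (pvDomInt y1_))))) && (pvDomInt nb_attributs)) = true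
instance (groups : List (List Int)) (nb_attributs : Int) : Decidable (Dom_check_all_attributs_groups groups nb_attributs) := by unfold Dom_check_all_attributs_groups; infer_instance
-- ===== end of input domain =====

-- B builds the set of present attributes once and appends the missing ones from a single
-- set difference, instead of A's per-attribute rescan of all groups (objective: faster, O(total+n) vs O(n·total)).
-- A mutates `groups` in place (appends); B performs the same appends, and the equivalence proved here is about the return value.

-- ===== PORT A =====
def sorted_groups (groups : List (List Int)) : List (List Int) :=
  groups.map (fun group => PySem.List.sorted group (fun x => x) false)

def check_all_attributs_groups (groups : List (List Int)) (nb_attributs : Int) : List (List Int) :=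
  sorted_groups ((PySem.List.pyRange 0 nb_attributs 1).foldl
    (fun gs i =>
      let flag := gs.foldl (fun f group => f || group.contains i) false
      if !flag then gs ++ [[i]] else gs)
    groups)

-- ===== PORT B =====
def sorted_groups_alt (groups : List (List Int)) : List (List Int) :=
  groups.map (fun group => PySem.List.sorted group (fun x => x) false)

def check_all_attributs_groups_alt (groups : List (List Int)) (nb_attributs : Int) : List (List Int) :=
  let present : PySem.Set Int := groups.foldl (fun s group => PySem.Set.update s group) PySem.Set.empty
  let missing : List Int :=
    PySem.List.sorted (PySem.Set.diff (PySem.Set.ofList (PySem.List.pyRange 0 nb_attributs 1)) present) (fun x => x) false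
  sorted_groups_alt (missing.foldl (fun gs i => gs ++ [[i]]) groups)

-- ===== PRECONDITION & SPEC =====
def Spec_check_all_attributs_groups (groups : List (List Int)) (nb_attributs : Int) (out : List (List Int)) : Prop := out = check_all_attributs_groups_alt groups nb_attributs
instance (groups : List (List Int)) (nb_attributs : Int) (out : List (List Int)) : Decidable (Spec_check_all_attributs_groups groups nb_attributs out) := by unfold Spec_check_all_attributs_groups; infer_instance

-- ===== CLAIM (what is proved, stated in full; the proofs are below) =====
def Claim_equal_check_all_attributs_groups : Prop := ∀ (groups : List (List Int)) (nb_attributs : Int), Dom_check_all_attributs_groups groups nb_attributs → Spec_check_all_attributs_groups groups nb_attributs (check_all_attributs_groups groups nb_attributs)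

-- ===== LEMMAS AND PROOFS =====

-- A's inner loop computes `any`
theorem flag_eq_any (gs : List (List Int)) (i : Int) (b : Bool) :
    gs.foldl (fun f group => f || group.contains i) b = (b || gs.any (fun g => g.contains i)) := by
  induction gs generalizing b with
  | nil => simp
  | cons g t ih =>
    rw [List.foldl_cons, ih, List.any_cons]
    cases b <;> simp

-- A's outer loop appends, after the original groups, the singleton [i] for every missing i in increasing order
theorem loopA (nb : Int) : ∀ (n : Nat) (a : Int) (base extra : List (List Int)),
    (nb - a).toNat = n →
    (∀ g ∈ extra, ∃ j : Int, g = [j] ∧ j < a) →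
    (PySem.List.pyRange a nb 1).foldl
      (fun gs i =>
        let flag := gs.foldl (fun f group => f || group.contains i) false
        if !flag then gs ++ [[i]] else gs)
      (base ++ extra)
    = base ++ extra ++
      ((PySem.List.pyRange a nb 1).filter (fun i => !(base.any (fun g => g.contains i)))).map (fun i => [i]) := by
  intro n
  induction n with
  | zero =>
    intro a base extra h _
    have hba : nb ≤ a := by omega
    simp [PySem.List.pyRange_one_eq_nil hba]
  | succ n ih =>
    intro a base extra h hextra
    have hab : a < nb := by omega
    rw [PySem.List.pyRange_one_cons hab]
    have hextraA : extra.any (fun g => g.contains a) = false := by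
      rw [List.any_eq_false]
      intro g hg
      obtain ⟨j, rfl, hj⟩ := hextra g hg
      have hne : a ≠ j := by omega
      simp [hne]
    have hflag : (base ++ extra).foldl (fun f group => f || group.contains a) false
        = base.any (fun g => g.contains a) := by
      rw [flag_eq_any, Bool.false_or, List.any_append, hextraA, Bool.or_false]
    by_cases hP : base.any (fun g => g.contains a) = true
    · simp only [List.foldl_cons, List.filter_cons, hflag, hP, Bool.not_true,
        if_neg (show ¬(false = true) by decide)]
      exact ih (a + 1) base extra (by omega)
        (fun g hg => by obtain ⟨j, rfl, hj⟩ := hextra g hg; exact ⟨j, rfl, by omega⟩)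
    · have hP' : base.any (fun g => g.contains a) = false := by
        simpa using hP
      simp only [List.foldl_cons, List.filter_cons, hflag, hP', Bool.not_false]
      rw [if_pos trivial, if_pos trivial]
      have := ih (a + 1) base (extra ++ [[a]]) (by omega)
        (fun g hg => by
          rcases List.mem_append.1 hg with hg | hg
          · obtain ⟨j, rfl, hj⟩ := hextra g hg; exact ⟨j, rfl, by omega⟩
          · simp at hg; exact ⟨a, hg, by omega⟩)
      rw [List.append_assoc base extra [[a]]]
      rw [this]
      simp

-- membership in B's `present` set
theorem mem_present (gs : List (List Int)) (s : PySem.Set Int) (y : Int) :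
    (y ∈ gs.foldl (fun s group => PySem.Set.update s group) s) ↔ (y ∈ s ∨ ∃ g ∈ gs, y ∈ g) := by
  induction gs generalizing s with
  | nil => simp
  | cons g t ih =>
    simp only [List.foldl_cons, ih, PySem.Set.mem_update, List.mem_cons]
    constructor
    · rintro (⟨h | h⟩ | ⟨g', hg', hy⟩)
      · exact Or.inl h
      · exact Or.inr ⟨g, Or.inl rfl, h⟩
      · exact Or.inr ⟨g', Or.inr hg', hy⟩
    · rintro (h | ⟨g', (rfl | hg'), hy⟩)
      · exact Or.inl (Or.inl h)
      · exact Or.inl (Or.inr hy)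
      · exact Or.inr ⟨g', hg', hy⟩

-- appending the elements of a list one by one
theorem foldl_append_singletons (l : List Int) : ∀ (init : List (List Int)),
    l.foldl (fun gs i => gs ++ [[i]]) init = init ++ l.map (fun i => [i]) := by
  induction l with
  | nil => intro init; simp
  | cons x t ih => intro init; simp [List.foldl_cons, ih]

-- B's `missing` list is exactly A's filtered range
theorem missing_eq (groups : List (List Int)) (nb : Int) :
    PySem.List.sorted
      (PySem.Set.diff (PySem.Set.ofList (PySem.List.pyRange 0 nb 1))
        (groups.foldl (fun s group => PySem.Set.update s group) PySem.Set.empty)) (fun x => x) false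
    = (PySem.List.pyRange 0 nb 1).filter (fun i => !(groups.any (fun g => g.contains i))) := by
  apply PySem.List.sorted_eq_of_perm_of_pairwise_lt
  · rw [List.perm_ext_iff_of_nodup (List.Nodup.filter _ (PySem.List.nodup_pyRange_one 0 nb))
      (PySem.Set.nodup_diff _ _ (PySem.Set.nodup_ofList _))]
    intro x
    simp only [List.mem_filter, PySem.Set.mem_diff, PySem.Set.mem_ofList, mem_present,
      PySem.Set.empty, List.not_mem_nil, false_or, Bool.not_eq_eq_eq_not,
      Bool.not_true, List.any_eq_false, List.contains_eq_mem,
      decide_eq_true_eq]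
    push Not
    tauto
  · exact List.Pairwise.filter _ (PySem.List.pairwise_lt_pyRange_one 0 nb)

-- ===== VERDICT (by name: the statement is the Claim_ definition above) =====
theorem check_all_attributs_groups_spec : Claim_equal_check_all_attributs_groups := by
  intro groups nb_attributs _
  unfold Spec_check_all_attributs_groups check_all_attributs_groups check_all_attributs_groups_alt
  simp only
  rw [missing_eq, foldl_append_singletons]
  have hA := loopA nb_attributs (nb_attributs - 0).toNat 0 groups [] rfl (by simp)
  rw [List.append_nil] at hA
  rw [hA]
  rfl
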